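-- pv_equiv track=rewrite | github.com/OpenPecha/pecha.org-data | catalog_parser/third_party/leavedonto/leavedonto/convert2yaml.py | __group_leaf_entries
-- ===== SOURCE A (Python) =====
-- def __group_leaf_entries(out):
--     start = "- -"
--     legend = "- "
--     processed = []
--     cur_idx = 0
--     lines_with_split_long_lines = out.split("\n")
--     lines = []
--     for line in lines_with_split_long_lines:
--         if line.lstrip().startswith('-') or line.rstrip().endswith(':'):
--             lines.append(line)
--         else:
--             lines[-1] = lines[-1].rstrip() + ' ' + line.lstrip()
--
--     while cur_idx < len(lines):
--         cur_line = lines[cur_idx]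
--         if start not in cur_line and not cur_line.startswith(legend):
--             processed.append(cur_line)
--
--         elif cur_line.startswith(legend):
--             # find legend
--             group = [cur_line]
--             while lines[cur_idx].startswith(legend):
--                 group.append(lines[cur_idx])
--                 cur_idx += 1
--             cur_idx -= 1  # undo extra increment
--
--             # convert to list
--             parts = []
--             for el in group[1:]:
--                 parts.append(el.replace(legend, ""))
--             formatted = f' [{", ".join(parts)}]'
--
--             processed[-1] += formatted
--
--         else:
--             # find entries
--             prefix = cur_line[: cur_line.find(start)]
--             group = [cur_line]
--             cur_idx += 1
--             while cur_idx < len(lines) and lines[cur_idx].startswith(f"{prefix}  -"):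
--                 group.append(lines[cur_idx])
--                 cur_idx += 1
--             cur_idx -= 1  # undo extra increment
--
--             # convert to list
--             parts = [group[0].replace(prefix + start + " ", "")]
--             for el in group[1:]:
--                 parts.append(el.replace(f"{prefix}  - ", ""))
--             formatted = f'{prefix}- [{", ".join(parts)}]'
--
--             processed.append(formatted)
--         cur_idx += 1
--
--     return "\n".join(processed)
-- ===== SOURCE B (Python) =====
-- def __group_leaf_entries(out):
--     # merge continuation lines (identical preprocessing to the original)
--     lines = []
--     for ln in out.split("\n"):
--         if ln.lstrip().startswith('-') or ln.rstrip().endswith(':'):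
--             lines.append(ln)
--         else:
--             lines[-1] = lines[-1].rstrip() + ' ' + ln.lstrip()
--
--     # single pass: each merged line is visited exactly once by an explicit
--     # finite-state machine (idle / inside-legend / inside-entry), no lookahead,
--     # no index arithmetic; a group is closed lazily when a non-member line arrives.
--     processed = []
--     mode = ('idle',)
--
--     def flush():
--         nonlocal mode
--         if mode[0] == 'legend':
--             processed[-1] += ' [' + ', '.join(mode[1]) + ']'
--         elif mode[0] == 'entry':
--             processed.append(mode[1] + '- [' + ', '.join(mode[2]) + ']')
--         mode = ('idle',)
--
--     for l in lines:
--         if mode[0] == 'legend' and l.startswith('- '):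
--             mode[1].append(l.replace('- ', ''))
--             continue
--         if mode[0] == 'entry' and l.startswith(mode[1] + '  -'):
--             mode[2].append(l.replace(mode[1] + '  - ', ''))
--             continue
--         flush()
--         if l.startswith('- '):
--             mode = ('legend', [l.replace('- ', '')])
--         elif '- -' in l:
--             prefix = l[:l.find('- -')]
--             mode = ('entry', prefix, [l.replace(prefix + '- - ', '')])
--         else:
--             processed.append(l)
--     flush()
--     return '\n'.join(processed)
-- ===== Notes on version B (the rewrite author's own statement) =====
-- stated objective: alternative
-- what changed: A groups by lookahead: an outer index-juggling while-loop with inner while-loops that re-scan each run and cur_idx -=1/+=1 corrections; B visits each merged line exactly once in a single pass driven by an explicit finite-state machine (idle / inside-legend / inside-entry) that accumulates the current group's parts incrementally and closes a group lazily when a non-member line arrives, with no lookahead or index arithmetic.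
-- outside the precondition, e.g. on __group_leaf_entries('-- - x\n-  - y'): A returns '-- [x, y]', B returns '-- [x, y]'; on __group_leaf_entries('- '): A raises IndexError, B raises IndexError
import Mathlib
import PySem

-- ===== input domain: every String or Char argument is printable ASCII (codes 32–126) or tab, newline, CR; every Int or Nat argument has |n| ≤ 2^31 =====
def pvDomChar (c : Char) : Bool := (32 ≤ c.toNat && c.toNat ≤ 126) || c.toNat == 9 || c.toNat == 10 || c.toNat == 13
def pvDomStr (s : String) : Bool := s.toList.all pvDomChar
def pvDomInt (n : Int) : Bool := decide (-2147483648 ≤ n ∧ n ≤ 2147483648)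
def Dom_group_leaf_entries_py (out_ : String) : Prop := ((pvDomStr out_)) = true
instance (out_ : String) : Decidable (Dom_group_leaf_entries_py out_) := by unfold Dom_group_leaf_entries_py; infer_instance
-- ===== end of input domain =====

-- B replaces A's lookahead grouping (outer while-loop with inner re-scanning while-loops and
-- index corrections) by a single pass over the merged lines driven by an explicit finite-state
-- machine that accumulates the current group incrementally; same cost, alternative algorithm.

-- ===== PORT A =====

-- shared by both ports (the merge pass is textually identical in both Pythons):
-- `line.lstrip().startswith('-') or line.rstrip().endswith(':')`
def pvKeep (l : String) : Bool :=
  PySem.Str.startswith (PySem.Str.lstrip l) "-" || PySem.Str.endswith (PySem.Str.rstrip l) ":"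

-- `xs[-1] = f(xs[-1])`; on [] Python raises IndexError (excluded by Pre_), here a no-op
def pvModifyLast (f : String → String) : List String → List String
  | [] => []
  | [x] => [f x]
  | x :: y :: xs => x :: pvModifyLast f (y :: xs)

-- one iteration of the merge loop: append a kept line, else fold the continuation into lines[-1]
def pvMergeStep (acc : List String) (line : String) : List String :=
  if pvKeep line then acc ++ [line]
  else pvModifyLast (fun s => PySem.Str.rstrip s ++ " " ++ PySem.Str.lstrip line) acc

def pvMergeLines (raw : List String) : List String := raw.foldl pvMergeStep []

-- out.split("\n") (separator nonempty, so Python's str.split is exact here)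
def pvSplitNL (s : String) : List String :=
  (PySem.Chars.splitOn s.toList ['\n']).map String.ofList

-- A's two inner `while` loops (both collect `group.append(lines[k]); k += 1` while
-- lines[k] starts with a pattern).  The legend `while` has no bound check in Python and
-- raises IndexError at the end of `lines`; that input is excluded by Pre_, here we stop.
def pvCollect (lines : List String) (pat : String) (k : Nat) (group : List String) :
    List String × Nat :=
  if h : k < lines.length then
    if PySem.Str.startswith lines[k] pat then pvCollect lines pat (k+1) (group ++ [lines[k]])
    else (group, k)
  else (group, k)
termination_by lines.length - k

-- A's main `while cur_idx < len(lines)` loop, a structural recursion on a step-count fuel: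
-- each iteration advances cur_idx by at least 1, so fuel = len(lines) (supplied below) never runs
-- out while cur_idx < len(lines); the `cur_idx -= 1` / `cur_idx += 1` pair of A nets to resuming
-- at the index returned by the inner while loop.
def pvALoop (lines : List String) : Nat → Nat → List String → List String
  | 0, _, processed => processed
  | fuel+1, i, processed =>
    if h : i < lines.length then
      let cur := lines[i]
      if !PySem.Str.isIn "- -" cur && !PySem.Str.startswith cur "- " then
        pvALoop lines fuel (i+1) (processed ++ [cur])
      else if PySem.Str.startswith cur "- " then
        -- legend: group = [cur_line] then re-collect the whole run from cur_idx (cur duplicated)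
        let gj := pvCollect lines "- " i [cur]
        let parts := (gj.1.drop 1).map (fun el => PySem.Str.replace el "- " "")
        let formatted := " [" ++ PySem.Str.join ", " parts ++ "]"
        -- processed[-1] += formatted (IndexError on empty processed; excluded by Pre_)
        pvALoop lines fuel gj.2 (pvModifyLast (fun s => s ++ formatted) processed)
      else
        -- entries: prefix = cur_line[:cur_line.find("- -")]
        let pre := PySem.Str.slice cur none (some (PySem.Str.find cur "- -"))
        let gj := pvCollect lines (pre ++ "  -") (i+1) [cur]
        let parts := PySem.Str.replace gj.1.headI (pre ++ "- - ") "" ::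
          (gj.1.drop 1).map (fun el => PySem.Str.replace el (pre ++ "  - ") "")
        let formatted := pre ++ "- [" ++ PySem.Str.join ", " parts ++ "]"
        pvALoop lines fuel gj.2 (processed ++ [formatted])
    else processed

def group_leaf_entries_py (out_ : String) : String :=
  let lines := pvMergeLines (pvSplitNL out_)
  PySem.Str.join "\n" (pvALoop lines lines.length 0 [])

-- ===== PORT B =====

-- the state machine's mode: idle, inside a legend run (collected parts), or inside an
-- entry run (its prefix and collected parts)
inductive PvMode
  | idle : PvMode
  | legend : List String → PvMode
  | entry : String → List String → PvMode
deriving DecidableEq, Repr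

-- Source B's flush(): close the pending group (attach a legend list to processed[-1],
-- emit an entry line), returning the new processed (the mode becomes idle at call sites)
def pvFlush : PvMode → List String → List String
  | PvMode.idle, p => p
  | PvMode.legend parts, p =>
      pvModifyLast (fun s => s ++ (" [" ++ PySem.Str.join ", " parts ++ "]")) p
  | PvMode.entry pre parts, p =>
      p ++ [pre ++ "- [" ++ PySem.Str.join ", " parts ++ "]"]

-- the classification of a line met in idle mode (the if/elif/else after flush())
def pvClassify (p : List String) (l : String) : List String × PvMode :=
  if PySem.Str.startswith l "- " then
    (p, PvMode.legend [PySem.Str.replace l "- " ""])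
  else if PySem.Str.isIn "- -" l then
    let pre := PySem.Str.slice l none (some (PySem.Str.find l "- -"))
    (p, PvMode.entry pre [PySem.Str.replace l (pre ++ "- - ") ""])
  else (p ++ [l], PvMode.idle)

-- one step of Source B's single-pass loop: extend the pending group if the line belongs to it,
-- otherwise flush and classify the line afresh
def pvStep : List String × PvMode → String → List String × PvMode
  | (p, PvMode.legend parts), l =>
      if PySem.Str.startswith l "- " then
        (p, PvMode.legend (parts ++ [PySem.Str.replace l "- " ""]))
      else pvClassify (pvFlush (PvMode.legend parts) p) l
  | (p, PvMode.entry pre parts), l =>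
      if PySem.Str.startswith l (pre ++ "  -") then
        (p, PvMode.entry pre (parts ++ [PySem.Str.replace l (pre ++ "  - ") ""]))
      else pvClassify (pvFlush (PvMode.entry pre parts) p) l
  | (p, PvMode.idle), l => pvClassify p l

def group_leaf_entries_py_alt (out_ : String) : String :=
  let lines := pvMergeLines (pvSplitNL out_)
  let st := lines.foldl pvStep ([], PvMode.idle)
  PySem.Str.join "\n" (pvFlush st.2 st.1)

-- ===== PRECONDITION & SPEC =====

-- does a second raw line exist and continue the first? (then it is merged into merged[0])
def pvContAt1 (raw : List String) : Bool :=
  match raw with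
  | _ :: b :: _ => !pvKeep b
  | _ => false

-- does the merged line that starts at kept line l open with "- "?  (l itself starts with "- ",
-- or l strips to a bare "-" and a continuation line is glued after it)
def pvLegendStart (l : String) (cont : Bool) : Bool :=
  PySem.Str.startswith l "- " || (PySem.Str.rstrip l == "-" && cont)

-- Pre_ excludes exactly the inputs on which Python A raises IndexError — a first raw line that is a
-- continuation (lines[-1] on an empty list), a first merged line opening a legend run (processed[-1]
-- on an empty list), or a last merged line belonging to a legend run (the unbounded legend while
-- scans past the end) — stated in closed form on the raw lines of out.split("\n"): the raw line that
-- starts the first/last merged line and whether a continuation line is glued onto it; the last-line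
-- condition conservatively also excludes the rare inputs whose trailing "- " line is consumed by an
-- entry group, where A returns (and B agrees; see the cite in claim.json).
def Pre_group_leaf_entries_py (out_ : String) : Prop :=
  let raw := pvSplitNL out_
  pvKeep raw.headI = true ∧
  pvLegendStart raw.headI (pvContAt1 raw) = false ∧
  pvLegendStart ((raw.filter pvKeep).getLastD "") (!pvKeep (raw.getLastD "")) = false

instance (out_ : String) : Decidable (Pre_group_leaf_entries_py out_) := by
  unfold Pre_group_leaf_entries_py; infer_instance

def pvWitness_group_leaf_entries_py : String := "key:\n  - - a\n  -  - b"

def Spec_group_leaf_entries_py (out_ : String) (out : String) : Prop :=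
  out = group_leaf_entries_py_alt out_
instance (out_ : String) (out : String) : Decidable (Spec_group_leaf_entries_py out_ out) := by
  unfold Spec_group_leaf_entries_py; infer_instance

-- ===== CLAIM (what is proved, stated in full; the proofs are below) =====
def Claim_equal_group_leaf_entries_py : Prop := ∀ (out_ : String), Dom_group_leaf_entries_py out_ → Pre_group_leaf_entries_py out_ → Spec_group_leaf_entries_py out_ (group_leaf_entries_py out_)

-- ===== LEMMAS AND PROOFS =====

-- "run the rest of B's pass from state (p, m) and flush at the end"
def pvRunB (xs : List String) (p : List String) (m : PvMode) : List String :=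
  let st := xs.foldl pvStep (p, m)
  pvFlush st.2 st.1

-- `lines[i:j]` for 0 ≤ i ≤ j
def pvSliceN (xs : List String) (i j : Nat) : List String := (xs.drop i).take (j - i)

-- `j = i; while j < n and lines[j].startswith(pat): j += 1` — the index where a run ends
def pvRunEnd (lines : List String) (pat : String) (k : Nat) : Nat :=
  if h : k < lines.length then
    if PySem.Str.startswith lines[k] pat then pvRunEnd lines pat (k+1) else k
  else k
termination_by lines.length - k

theorem pvRunEnd_ge (lines : List String) (pat : String) :
    ∀ k : Nat, k ≤ pvRunEnd lines pat k := by
  intro k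
  induction k using pvRunEnd.induct lines pat with
  | case1 k h hs ih => rw [pvRunEnd, dif_pos h, if_pos hs]; omega
  | case2 k h hs => rw [pvRunEnd, dif_pos h, if_neg hs]
  | case3 k h => rw [pvRunEnd, dif_neg h]

theorem pvSliceN_cons (xs : List String) (i j : Nat) (h : i < xs.length) (hij : i < j) :
    pvSliceN xs i j = xs[i] :: pvSliceN xs (i+1) j := by
  unfold pvSliceN
  rw [List.drop_eq_getElem_cons h]
  have : j - i = (j - (i+1)) + 1 := by omega
  rw [this, List.take_succ_cons]

theorem pvCollect_eq (lines : List String) (pat : String) :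
    ∀ (k : Nat) (group : List String),
      pvCollect lines pat k group =
        (group ++ pvSliceN lines k (pvRunEnd lines pat k), pvRunEnd lines pat k) := by
  intro k group
  induction k, group using pvCollect.induct lines pat with
  | case1 k group h hs ih =>
      rw [pvCollect, pvRunEnd, dif_pos h, dif_pos h, if_pos hs, if_pos hs, ih]
      have hgt : k < pvRunEnd lines pat (k+1) :=
        Nat.lt_of_lt_of_le (Nat.lt_succ_self k) (pvRunEnd_ge lines pat (k+1))
      rw [pvSliceN_cons lines k (pvRunEnd lines pat (k+1)) h hgt]
      simp
  | case2 k group h hs =>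
      rw [pvCollect, pvRunEnd, dif_pos h, dif_pos h, if_neg hs, if_neg hs]
      simp [pvSliceN]
  | case3 k group h =>
      rw [pvCollect, pvRunEnd, dif_neg h, dif_neg h]
      simp [pvSliceN]

-- one unfolding of B's pass, and pvStep's four behaviours as rewrite rules
theorem pvRunB_cons (x : String) (xs p : List String) (m : PvMode) :
    pvRunB (x :: xs) p m = pvRunB xs (pvStep (p, m) x).1 (pvStep (p, m) x).2 := rfl

theorem pvStep_idle (p : List String) (l : String) :
    pvStep (p, PvMode.idle) l = pvClassify p l := rfl

theorem pvNeTrue {b : Bool} (h : b = false) : ¬ (b = true) := by simp [h]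

theorem pvStep_legend_pos (p parts : List String) (l : String)
    (hs : PySem.Str.startswith l "- " = true) :
    pvStep (p, PvMode.legend parts) l =
      (p, PvMode.legend (parts ++ [PySem.Str.replace l "- " ""])) := by
  simp only [pvStep]; rw [if_pos hs]

theorem pvStep_legend_neg (p parts : List String) (l : String)
    (hs : PySem.Str.startswith l "- " = false) :
    pvStep (p, PvMode.legend parts) l = pvClassify (pvFlush (PvMode.legend parts) p) l := by
  simp only [pvStep]; rw [if_neg (pvNeTrue hs)]

theorem pvStep_entry_pos (p parts : List String) (pre l : String)
    (hs : PySem.Str.startswith l (pre ++ "  -") = true) :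
    pvStep (p, PvMode.entry pre parts) l =
      (p, PvMode.entry pre (parts ++ [PySem.Str.replace l (pre ++ "  - ") ""])) := by
  simp only [pvStep]; rw [if_pos hs]

theorem pvStep_entry_neg (p parts : List String) (pre l : String)
    (hs : PySem.Str.startswith l (pre ++ "  -") = false) :
    pvStep (p, PvMode.entry pre parts) l =
      pvClassify (pvFlush (PvMode.entry pre parts) p) l := by
  simp only [pvStep]; rw [if_neg (pvNeTrue hs)]

-- running B from legend mode consumes exactly the "- " run and then behaves as if the
-- flushed processed list were reached in idle mode
theorem pvRunB_legend (lines : List String) :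
    ∀ (k : Nat) (parts p : List String),
      pvRunB (lines.drop k) p (PvMode.legend parts) =
        pvRunB (lines.drop (pvRunEnd lines "- " k))
          (pvFlush (PvMode.legend
            (parts ++ (pvSliceN lines k (pvRunEnd lines "- " k)).map
              (fun el => PySem.Str.replace el "- " ""))) p)
          PvMode.idle := by
  intro k
  induction k using pvRunEnd.induct lines "- " with
  | case1 k h hs ih =>
      intro parts p
      rw [pvRunEnd, dif_pos h, if_pos hs]
      rw [List.drop_eq_getElem_cons h, pvRunB_cons, pvStep_legend_pos p parts lines[k] hs]
      dsimp only
      rw [ih (parts ++ [PySem.Str.replace lines[k] "- " ""]) p]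
      have hgt : k < pvRunEnd lines "- " (k+1) :=
        Nat.lt_of_lt_of_le (Nat.lt_succ_self k) (pvRunEnd_ge lines "- " (k+1))
      rw [pvSliceN_cons lines k _ h hgt, List.map_cons]
      simp
  | case2 k h hs =>
      intro parts p
      rw [pvRunEnd, dif_pos h, if_neg hs]
      have hs0 : PySem.Str.startswith lines[k] "- " = false := by simpa using hs
      have hsl : pvSliceN lines k k = [] := by simp [pvSliceN]
      rw [hsl, List.map_nil, List.append_nil]
      rw [List.drop_eq_getElem_cons h, pvRunB_cons, pvRunB_cons,
        pvStep_legend_neg p parts lines[k] hs0, pvStep_idle]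
  | case3 k h =>
      intro parts p
      rw [pvRunEnd, dif_neg h]
      have hd : lines.drop k = [] := List.drop_eq_nil_of_le (by omega)
      rw [hd]
      have hsl : pvSliceN lines k k = [] := by simp [pvSliceN]
      rw [hsl, List.map_nil, List.append_nil]
      rfl

-- running B from entry mode consumes exactly the "prefix  -" run and then emits the entry
theorem pvRunB_entry (lines : List String) (pre : String) :
    ∀ (k : Nat) (parts p : List String),
      pvRunB (lines.drop k) p (PvMode.entry pre parts) =
        pvRunB (lines.drop (pvRunEnd lines (pre ++ "  -") k))
          (pvFlush (PvMode.entry pre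
            (parts ++ (pvSliceN lines k (pvRunEnd lines (pre ++ "  -") k)).map
              (fun el => PySem.Str.replace el (pre ++ "  - ") ""))) p)
          PvMode.idle := by
  intro k
  induction k using pvRunEnd.induct lines (pre ++ "  -") with
  | case1 k h hs ih =>
      intro parts p
      rw [pvRunEnd, dif_pos h, if_pos hs]
      rw [List.drop_eq_getElem_cons h, pvRunB_cons, pvStep_entry_pos p parts pre lines[k] hs]
      dsimp only
      rw [ih (parts ++ [PySem.Str.replace lines[k] (pre ++ "  - ") ""]) p]
      have hgt : k < pvRunEnd lines (pre ++ "  -") (k+1) :=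
        Nat.lt_of_lt_of_le (Nat.lt_succ_self k) (pvRunEnd_ge lines (pre ++ "  -") (k+1))
      rw [pvSliceN_cons lines k _ h hgt, List.map_cons]
      simp
  | case2 k h hs =>
      intro parts p
      rw [pvRunEnd, dif_pos h, if_neg hs]
      have hs0 : PySem.Str.startswith lines[k] (pre ++ "  -") = false := by simpa using hs
      have hsl : pvSliceN lines k k = [] := by simp [pvSliceN]
      rw [hsl, List.map_nil, List.append_nil]
      rw [List.drop_eq_getElem_cons h, pvRunB_cons, pvRunB_cons,
        pvStep_entry_neg p parts pre lines[k] hs0, pvStep_idle]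
  | case3 k h =>
      intro parts p
      rw [pvRunEnd, dif_neg h]
      have hd : lines.drop k = [] := List.drop_eq_nil_of_le (by omega)
      rw [hd]
      have hsl : pvSliceN lines k k = [] := by simp [pvSliceN]
      rw [hsl, List.map_nil, List.append_nil]
      rfl

-- the main correspondence: A's fueled index loop from i equals B's pass over lines.drop i
theorem pvALoop_eq_runB (lines : List String) :
    ∀ (fuel i : Nat) (processed : List String), lines.length - i ≤ fuel →
      pvALoop lines fuel i processed = pvRunB (lines.drop i) processed PvMode.idle := by
  intro fuel
  induction fuel with
  | zero =>
      intro i processed hf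
      have hd : lines.drop i = [] := List.drop_eq_nil_of_le (by omega)
      rw [pvALoop, hd]; rfl
  | succ fuel ih =>
      intro i processed hf
      by_cases h : i < lines.length
      · rw [pvALoop]
        simp only [h, dif_pos]
        rw [List.drop_eq_getElem_cons h, pvRunB_cons, pvStep_idle]
        by_cases hs : PySem.Str.startswith lines[i] "- " = true
        · -- legend run
          have hsc : PySem.Chars.startswith lines[i].toList ['-', ' '] = true := by simpa using hs
          rw [if_neg (by simp [hsc]), if_pos hs]
          have hru : pvRunEnd lines "- " i = pvRunEnd lines "- " (i+1) := by
            rw [pvRunEnd, dif_pos h, if_pos hs]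
          have hcl : pvClassify processed lines[i] =
              (processed, PvMode.legend [PySem.Str.replace lines[i] "- " ""]) := by
            rw [pvClassify, if_pos hs]
          rw [hcl]
          dsimp only
          rw [pvRunB_legend]
          have hge := pvRunEnd_ge lines "- " (i+1)
          rw [← ih (pvRunEnd lines "- " (i+1)) _ (by omega)]
          simp only [pvCollect_eq, hru, List.singleton_append, List.drop_succ_cons,
            List.drop_zero, pvFlush]
          rw [pvSliceN_cons lines i (pvRunEnd lines "- " (i+1)) h (by omega), List.map_cons]
        · by_cases hin : PySem.Str.isIn "- -" lines[i] = true
          · -- entry run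
            have hinc : PySem.Chars.isIn ['-', ' ', '-'] lines[i].toList = true := by
              simpa using hin
            have hs0 : PySem.Str.startswith lines[i] "- " = false := by simpa using hs
            rw [if_neg (by simp [hinc]), if_neg hs]
            have hcl : pvClassify processed lines[i] =
                (processed, PvMode.entry
                  (PySem.Str.slice lines[i] none (some (PySem.Str.find lines[i] "- -")))
                  [PySem.Str.replace lines[i]
                    (PySem.Str.slice lines[i] none (some (PySem.Str.find lines[i] "- -"))
                      ++ "- - ") ""]) := by
              rw [pvClassify, if_neg (pvNeTrue hs0), if_pos hin]
            rw [hcl]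
            dsimp only
            rw [pvRunB_entry]
            have hge := pvRunEnd_ge lines
              (PySem.Str.slice lines[i] none (some (PySem.Str.find lines[i] "- -")) ++ "  -")
              (i+1)
            rw [← ih _ _ (by omega)]
            simp only [pvCollect_eq, List.singleton_append, List.drop_succ_cons,
              List.drop_zero, List.headI_cons, pvFlush]
          · -- plain line
            have hs0 : PySem.Str.startswith lines[i] "- " = false := by simpa using hs
            have hin0 : PySem.Str.isIn "- -" lines[i] = false := by simpa using hin
            rw [if_pos (by
              simp only [Bool.and_eq_true, Bool.not_eq_true']; exact ⟨hin0, hs0⟩)]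
            have hcl : pvClassify processed lines[i] = (processed ++ [lines[i]], PvMode.idle) := by
              rw [pvClassify, if_neg (pvNeTrue hs0), if_neg (pvNeTrue hin0)]
            rw [hcl]
            exact ih (i+1) _ (by omega)
      · rw [pvALoop]
        simp only [h, dif_neg, not_false_iff]
        have hd : lines.drop i = [] := List.drop_eq_nil_of_le (by omega)
        rw [hd]; rfl

-- ===== VERDICT (by name: the statement is the Claim_ definition above) =====
theorem group_leaf_entries_py_spec : Claim_equal_group_leaf_entries_py := by
  intro out_ _ _
  show group_leaf_entries_py out_ = group_leaf_entries_py_alt out_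
  show PySem.Str.join "\n"
      (pvALoop (pvMergeLines (pvSplitNL out_)) (pvMergeLines (pvSplitNL out_)).length 0 []) = _
  rw [pvALoop_eq_runB (pvMergeLines (pvSplitNL out_))
    (pvMergeLines (pvSplitNL out_)).length 0 [] (by omega)]
  rfl
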